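-- pv_equiv track=rewrite | github.com/bigjosh/gotham-pi-maker | file_reader.py | calculate_block_width
-- ===== SOURCE A (Python) =====
-- def calculate_block_width(block):
--     """
--     Calculate the width of a block based on character values.
--     '1' has width 2, all other characters have width 4.
--
--     Args:
--         block (str): The block of text to analyze
--
--     Returns:
--         int: Total width of the block
--     """
--     width = 0
--     for char in block:
--         if char == '1':
--             width += 2
--         else:
--             width += 4
--     return width
-- ===== SOURCE B (Python) =====
-- def calculate_block_width(block):
--     """Closed form: every char contributes 4, each '1' contributes 2 less."""
--     return 4 * len(block) - 2 * block.count('1')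
-- ===== Notes on version B (the rewrite author's own statement) =====
-- stated objective: simpler
-- what changed: Replaced the per-character accumulation loop with a closed-form expression 4*len(block) - 2*block.count('1') over two builtin aggregates.
import Mathlib
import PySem

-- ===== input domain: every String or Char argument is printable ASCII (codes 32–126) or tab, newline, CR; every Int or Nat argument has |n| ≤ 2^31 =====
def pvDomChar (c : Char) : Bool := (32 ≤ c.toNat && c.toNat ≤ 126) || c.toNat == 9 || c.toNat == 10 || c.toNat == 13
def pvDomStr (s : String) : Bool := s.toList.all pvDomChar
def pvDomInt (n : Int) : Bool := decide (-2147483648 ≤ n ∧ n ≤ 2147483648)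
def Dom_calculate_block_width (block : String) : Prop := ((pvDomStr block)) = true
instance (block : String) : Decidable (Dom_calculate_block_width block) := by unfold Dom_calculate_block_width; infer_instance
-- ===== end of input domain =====

-- B replaces A's per-character accumulation loop with the closed form
-- 4*len(block) - 2*block.count('1'); objective: simpler.

-- ===== PORT A =====
def calculate_block_width (block : String) : Int :=
  block.toList.foldl (fun width char => if char = '1' then width + 2 else width + 4) 0

-- ===== PORT B =====
def calculate_block_width_alt (block : String) : Int :=
  4 * (PySem.Str.len block : Int) - 2 * (PySem.Str.count block "1" : Int)

-- ===== PRECONDITION & SPEC =====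
def Spec_calculate_block_width (block : String) (out : Int) : Prop := out = calculate_block_width_alt block
instance (block : String) (out : Int) : Decidable (Spec_calculate_block_width block out) := by unfold Spec_calculate_block_width; infer_instance

-- ===== CLAIM (what is proved, stated in full; the proofs are below) =====
def Claim_equal_calculate_block_width : Prop := ∀ (block : String), Dom_calculate_block_width block → Spec_calculate_block_width block (calculate_block_width block)

-- ===== LEMMAS AND PROOFS =====

-- Chars.count with a single-character needle is List.count.
theorem pv_count_go_singleton (c : Char) :
    ∀ (fuel : Nat) (cs : List Char) (acc : Nat), cs.length ≤ fuel →
      PySem.Chars.count.go [c] fuel cs acc = acc + cs.count c := by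
  intro fuel
  induction fuel with
  | zero =>
    intro cs acc h
    have : cs = [] := List.eq_nil_of_length_eq_zero (Nat.le_zero.mp h)
    subst this; simp [PySem.Chars.count.go]
  | succ n ih =>
    intro cs acc h
    cases cs with
    | nil => simp [PySem.Chars.count.go]
    | cons x t =>
      simp only [PySem.Chars.count.go]
      by_cases hx : x = c
      · subst hx
        have hp : [x].isPrefixOf (x :: t) = true := by simp [List.isPrefixOf]
        rw [if_pos hp]
        simp only [List.length_singleton, List.drop_succ_cons, List.drop_zero]
        rw [ih t (acc + 1) (Nat.le_of_succ_le_succ h)]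
        simp [List.count_cons_self]
        omega
      · have hp : [c].isPrefixOf (x :: t) = false := by
          simp [List.isPrefixOf]
          exact fun hc => absurd hc.symm hx
        rw [if_neg (by simp [hp])]
        rw [ih t acc (Nat.le_of_succ_le_succ h)]
        simp [List.count_cons_of_ne (by exact fun hc => hx hc)]

theorem pv_count_singleton (cs : List Char) (c : Char) :
    PySem.Chars.count cs [c] = cs.count c := by
  simp only [PySem.Chars.count, List.isEmpty_cons, if_false, Bool.false_eq_true]
  simpa using pv_count_go_singleton c cs.length cs 0 (le_refl _)

theorem pv_foldl_width (cs : List Char) (a : Int) :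
    cs.foldl (fun width char => if char = '1' then width + 2 else width + 4) a
      = a + 4 * cs.length - 2 * cs.count '1' := by
  induction cs generalizing a with
  | nil => simp
  | cons x t ih =>
    simp only [List.foldl_cons, ih]
    by_cases hx : x = '1'
    · subst hx; simp [List.count_cons_self]; ring
    · rw [if_neg hx, List.count_cons_of_ne (fun hc => hx hc)]
      ring_nf
      simp [List.length_cons]
      ring

-- ===== VERDICT (by name: the statement is the Claim_ definition above) =====
theorem calculate_block_width_spec : Claim_equal_calculate_block_width := by
  intro block _
  unfold Spec_calculate_block_width calculate_block_width calculate_block_width_alt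
  rw [pv_foldl_width]
  simp [PySem.Str.len_eq, PySem.Str.count_eq]
  rw [pv_count_singleton]
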